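-- pv_equiv track=rewrite | github.com/chenjinqian/guess_four | guess.py | display_eval
-- ===== SOURCE A (Python) =====
-- def display_eval(value):
--     rlt = []
--     while value >= 8:
--         value -= 8
--         rlt.append("A")
--     while value >= 1:
--         value -= 1
--         rlt.append("B")
--     return "".join(rlt)
-- ===== SOURCE B (Python) =====
-- def display_eval(value):
--     if value <= 0:
--         return ""
--     return "A" * (value // 8) + "B" * (value % 8)
-- ===== Notes on version B (the rewrite author's own statement) =====
-- stated objective: simpler
-- what changed: Replaced the two decrementing while-loops and list accumulator with a single closed-form expression using integer division and modulo.
import Mathlib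
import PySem

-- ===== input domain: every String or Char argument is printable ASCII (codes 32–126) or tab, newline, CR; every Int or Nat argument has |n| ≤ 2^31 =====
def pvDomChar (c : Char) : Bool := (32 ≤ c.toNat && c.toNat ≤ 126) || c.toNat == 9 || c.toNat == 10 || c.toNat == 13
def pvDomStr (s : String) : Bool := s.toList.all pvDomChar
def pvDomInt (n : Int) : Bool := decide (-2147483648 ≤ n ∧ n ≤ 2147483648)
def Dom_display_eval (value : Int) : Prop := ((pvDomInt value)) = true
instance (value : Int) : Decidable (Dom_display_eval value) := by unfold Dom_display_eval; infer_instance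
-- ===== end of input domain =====

-- B replaces A's two decrementing while-loops with a closed form via // and %; objective: simpler.

-- ===== PORT A =====
-- while value >= 8: value -= 8; rlt.append("A")
def pvLoopA (value : Int) (rlt : List String) : Int × List String :=
  if 8 ≤ value then pvLoopA (value - 8) (rlt ++ ["A"]) else (value, rlt)
termination_by value.toNat
decreasing_by omega

-- while value >= 1: value -= 1; rlt.append("B")
def pvLoopB (value : Int) (rlt : List String) : Int × List String :=
  if 1 ≤ value then pvLoopB (value - 1) (rlt ++ ["B"]) else (value, rlt)
termination_by value.toNat
decreasing_by omega

def display_eval (value : Int) : String :=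
  let p := pvLoopA value []
  let q := pvLoopB p.1 p.2
  PySem.Str.join "" q.2

-- ===== PORT B =====
def display_eval_alt (value : Int) : String :=
  if value ≤ 0 then ""
  else String.ofList (List.replicate (PySem.Int.floordiv value 8).toNat 'A'
                      ++ List.replicate (PySem.Int.mod value 8).toNat 'B')

-- ===== PRECONDITION & SPEC =====
def Spec_display_eval (value : Int) (out : String) : Prop := out = display_eval_alt value
instance (value : Int) (out : String) : Decidable (Spec_display_eval value out) := by unfold Spec_display_eval; infer_instance

-- ===== CLAIM (what is proved, stated in full; the proofs are below) =====
def Claim_equal_display_eval : Prop := ∀ (value : Int), Dom_display_eval value → Spec_display_eval value (display_eval value)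

-- ===== LEMMAS AND PROOFS =====

theorem pvLoopA_eq (n : Nat) (r : List String) :
    pvLoopA (n : Int) r = (((n % 8 : Nat) : Int), r ++ List.replicate (n / 8) "A") := by
  induction n using Nat.strong_induction_on generalizing r with
  | _ n ih =>
    rw [pvLoopA]
    by_cases h : 8 ≤ (n : Int)
    · have hn : 8 ≤ n := by exact_mod_cast h
      have hcast : (n : Int) - 8 = ((n - 8 : Nat) : Int) := by omega
      rw [if_pos h, hcast, ih (n - 8) (by omega)]
      have h1 : (n - 8) % 8 = n % 8 := by omega
      have h2 : n / 8 = (n - 8) / 8 + 1 := by omega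
      rw [h1, h2]
      simp [List.replicate_succ]
    · have hn : n < 8 := by omega
      rw [if_neg h]
      have : n / 8 = 0 := by omega
      simp [this, Nat.mod_eq_of_lt hn]

theorem pvLoopB_eq (n : Nat) (r : List String) :
    pvLoopB (n : Int) r = (0, r ++ List.replicate n "B") := by
  induction n generalizing r with
  | zero => rw [pvLoopB]; simp
  | succ k ih =>
    rw [pvLoopB]
    have h : 1 ≤ ((k + 1 : Nat) : Int) := by omega
    have hcast : ((k + 1 : Nat) : Int) - 1 = (k : Int) := by omega
    rw [if_pos h, hcast, ih]
    simp [List.replicate_succ]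

theorem pvLoopA_lt (v : Int) (r : List String) (h : v < 8) : pvLoopA v r = (v, r) := by
  rw [pvLoopA, if_neg (by omega)]

theorem pvLoopB_lt (v : Int) (r : List String) (h : v < 1) : pvLoopB v r = (v, r) := by
  rw [pvLoopB, if_neg (by omega)]

theorem pv_join_rep (a b : Nat) :
    PySem.Str.join "" (List.replicate a "A" ++ List.replicate b "B")
      = String.ofList (List.replicate a 'A' ++ List.replicate b 'B') := by
  apply String.toList_inj.mp
  simp [List.map_replicate]
  rw [show (List.replicate a ['A'] ++ List.replicate b ['B'])
        = (List.replicate a 'A' ++ List.replicate b 'B').map (fun c => [c]) by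
      simp [List.map_replicate]]
  exact PySem.Chars.join_nil_singletons _

-- ===== VERDICT (by name: the statement is the Claim_ definition above) =====
theorem display_eval_spec : Claim_equal_display_eval := by
  intro value _hdom
  unfold Spec_display_eval display_eval display_eval_alt
  rcases lt_or_ge 0 value with hpos | hle
  · obtain ⟨n, rfl⟩ := Int.eq_ofNat_of_zero_le (le_of_lt hpos)
    rw [if_neg (by omega)]
    simp only [pvLoopA_eq n [], List.nil_append]
    rw [pvLoopB_eq (n % 8) (List.replicate (n / 8) "A")]
    have hf : PySem.Int.floordiv (n : Int) 8 = ((n / 8 : Nat) : Int) := by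
      exact_mod_cast PySem.Int.floordiv_natCast n 8
    have hm : PySem.Int.mod (n : Int) 8 = ((n % 8 : Nat) : Int) := by
      exact_mod_cast PySem.Int.mod_natCast n 8
    rw [hf, hm, Int.toNat_natCast, Int.toNat_natCast]
    exact pv_join_rep (n / 8) (n % 8)
  · simp only [pvLoopA_lt value [] (by omega), pvLoopB_lt value [] (by omega), if_pos hle]
    rfl
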